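-- pv_equiv track=rewrite | github.com/lorenaferr1520/treinoprojeto20_python | manipulaçãodestr/snaketocamel.py | eh_snake_case
-- ===== SOURCE A (Python) =====
-- def eh_snake_case(texto: str) -> bool:
--     if not texto:
--         return False
--
--     if texto[0] == "_" or texto[-1] == "_":
--         return False
--
--     if "__" in texto:
--         return False
--
--     if " " in texto:
--         return False
--
--     for c in texto:
--         if not (c.islower() or c.isdigit() or c == "_"):
--             return False
--
--     return True
-- ===== SOURCE B (Python) =====
-- def eh_snake_case(texto: str) -> bool:
--     if not texto:
--         return False
--     if texto[0] == "_":
--         return False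
--     prev_underscore = False
--     for c in texto:
--         if not (c.islower() or c.isdigit() or c == "_"):
--             return False
--         if c == "_" and prev_underscore:
--             return False
--         prev_underscore = (c == "_")
--     return not prev_underscore
-- ===== Notes on version B (the rewrite author's own statement) =====
-- stated objective: alternative
-- what changed: Replaced A's four separate scans (head/tail indexing, a '__' substring search, a ' ' search, then a per-char class loop) by one linear pass that keeps a previous-underscore flag; no substring search is performed.
import Mathlib
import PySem

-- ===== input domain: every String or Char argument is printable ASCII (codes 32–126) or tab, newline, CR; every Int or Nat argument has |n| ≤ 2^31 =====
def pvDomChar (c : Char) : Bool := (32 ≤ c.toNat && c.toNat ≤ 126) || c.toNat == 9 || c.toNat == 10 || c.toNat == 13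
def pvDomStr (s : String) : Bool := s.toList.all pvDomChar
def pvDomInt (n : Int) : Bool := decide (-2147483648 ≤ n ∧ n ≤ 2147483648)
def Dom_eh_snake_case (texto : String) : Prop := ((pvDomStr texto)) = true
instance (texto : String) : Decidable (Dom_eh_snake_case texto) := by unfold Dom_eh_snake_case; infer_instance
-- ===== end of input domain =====

-- B replaces A's four separate scans ('__'/' ' substring searches plus a class loop) by one
-- linear pass with a previous-underscore flag; same return value, alternative decomposition.

-- shared character class: c.islower() or c.isdigit() or c == "_"
def snakeAllow (c : Char) : Bool :=
  PySem.Chars.islower c || PySem.Chars.isdigit c || c == '_'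

-- ===== PORT A =====
def eh_snake_case (texto : String) : Bool :=
  let cs := texto.toList
  if cs = [] then false
  else if PySem.List.pyGetD cs 0 ' ' == '_' || PySem.List.pyGetD cs (-1) ' ' == '_' then false
  else if PySem.Chars.isIn ['_', '_'] cs then false
  else if PySem.Chars.isIn [' '] cs then false
  else cs.all snakeAllow

-- ===== PORT B =====
-- loop body of Source B: state = (still valid, previous char was '_')
def snakeStep (st : Bool × Bool) (c : Char) : Bool × Bool :=
  (st.1 && snakeAllow c && !(c == '_' && st.2), c == '_')

def eh_snake_case_alt (texto : String) : Bool :=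
  match texto.toList with
  | [] => false
  | c0 :: rest =>
    if c0 == '_' then false
    else
      let r := (c0 :: rest).foldl snakeStep (true, false)
      r.1 && !r.2

-- ===== PRECONDITION & SPEC =====
def Spec_eh_snake_case (texto : String) (out : Bool) : Prop := out = eh_snake_case_alt texto
instance (texto : String) (out : Bool) : Decidable (Spec_eh_snake_case texto out) := by unfold Spec_eh_snake_case; infer_instance

-- ===== CLAIM (what is proved, stated in full; the proofs are below) =====
def Claim_equal_eh_snake_case : Prop := ∀ (texto : String), Dom_eh_snake_case texto → Spec_eh_snake_case texto (eh_snake_case texto)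

-- ===== LEMMAS AND PROOFS =====

-- valid-flag of B's fold, characterised: no forbidden char and no double underscore
def noDub (p : Bool) : List Char → Bool
  | [] => true
  | c :: t => (!(p && c == '_')) && noDub (c == '_') t

-- prev-underscore flag of B's fold
def lastU (p : Bool) : List Char → Bool
  | [] => p
  | c :: t => lastU (c == '_') t

theorem foldl_snakeStep (cs : List Char) : ∀ ok p : Bool,
    cs.foldl snakeStep (ok, p) = (ok && cs.all snakeAllow && noDub p cs, lastU p cs) := by
  induction cs with
  | nil => intro ok p; simp [noDub, lastU]
  | cons c t ih =>
    intro ok p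
    simp only [List.foldl_cons, snakeStep, ih, noDub, lastU, List.all_cons, Prod.mk.injEq]
    refine ⟨?_, trivial⟩
    cases ok <;> cases p <;> cases h : snakeAllow c <;> cases h2 : (c == '_') <;> simp

theorem lastU_eq (cs : List Char) : ∀ (p : Bool) (c : Char),
    lastU p (c :: cs) = ((c :: cs).getLast (by simp) == '_') := by
  induction cs with
  | nil => intro p c; simp [lastU]
  | cons b t ih =>
    intro p c
    have : (c :: b :: t).getLast (by simp) = (b :: t).getLast (by simp) :=
      List.getLast_cons (by simp)
    rw [this, lastU, ih]

theorem noDub_false_iff (cs : List Char) : ∀ p : Bool,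
    noDub p cs = false ↔ (p = true ∧ ∃ s, cs = '_' :: s) ∨ ['_', '_'] <:+: cs := by
  induction cs with
  | nil => intro p; simp [noDub]
  | cons c t ih =>
    intro p
    by_cases hc : c = '_'
    · subst hc
      cases p with
      | true =>
        simp only [noDub]
        simp
      | false =>
        simp only [noDub, Bool.false_and, Bool.not_false, Bool.true_and, beq_self_eq_true]
        rw [ih true]
        constructor
        · rintro (⟨-, s, rfl⟩ | hinf)
          · exact Or.inr ⟨[], s, rfl⟩
          · exact Or.inr (List.infix_cons hinf)
        · rintro (⟨h, -⟩ | hinf)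
          · exact absurd h (by simp)
          · rcases List.infix_cons_iff.mp hinf with hpre | hinf'
            · obtain ⟨r, hr⟩ := hpre
              simp only [List.cons_append, List.nil_append, List.cons.injEq] at hr
              exact Or.inl ⟨rfl, r, hr.2.symm⟩
            · exact Or.inr hinf'
    · have hC : (c == '_') = false := by simp [hc]
      simp only [noDub, hC, Bool.and_false, Bool.not_false, Bool.true_and]
      rw [ih false]
      constructor
      · rintro (⟨h, -⟩ | hinf)
        · exact absurd h (by simp)
        · exact Or.inr (List.infix_cons hinf)
      · rintro (⟨-, s, hs⟩ | hinf)
        · exact absurd (List.cons.inj hs).1 hc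
        · rcases List.infix_cons_iff.mp hinf with hpre | h'
          · obtain ⟨r, hr⟩ := hpre
            simp only [List.cons_append, List.nil_append, List.cons.injEq] at hr
            exact absurd hr.1.symm hc
          · exact Or.inr h'

theorem allow_space_mem {cs : List Char} (h : ' ' ∈ cs) : cs.all snakeAllow = false := by
  simp only [List.all_eq_false]
  exact ⟨' ', h, by decide⟩

-- ===== VERDICT (by name: the statement is the Claim_ definition above) =====
theorem eh_snake_case_spec : Claim_equal_eh_snake_case := by
  intro texto _
  unfold Spec_eh_snake_case eh_snake_case eh_snake_case_alt
  cases h : texto.toList with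
  | nil => simp
  | cons c t =>
    have hne : c :: t ≠ [] := by simp
    simp only [foldl_snakeStep, lastU_eq, PySem.List.pyGetD_neg_one (c :: t) ' ' hne,
      PySem.List.pyGetD_zero_cons, Bool.true_and]
    by_cases hc : c = '_'
    · simp [hc]
    · have hc' : (c == '_') = false := by simp [hc]
      by_cases hl : (c :: t).getLast hne = '_'
      · simp [hl, hc']
      · have hl' : ((c :: t).getLast hne == '_') = false := by simp [hl]
        by_cases hdd : PySem.Chars.isIn ['_', '_'] (c :: t) = true
        · have hinf : ['_', '_'] <:+: (c :: t) := (PySem.Chars.isIn_iff_infix _ _).mp hdd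
          have hnd0 : noDub (c == '_') t = false := by
            have := (noDub_false_iff (c :: t) false).mpr (Or.inr hinf)
            simpa [noDub] using this
          rw [hc'] at hnd0
          simp [hdd, hc', hl', noDub, hnd0]
        · have hdd' : PySem.Chars.isIn ['_', '_'] (c :: t) = false := by simpa using hdd
          have hnd : noDub (c == '_') t = true := by
            rcases hh : noDub (c == '_') t with _ | _
            · have : noDub false (c :: t) = false := by simp [noDub, hh]
              rcases (noDub_false_iff (c :: t) false).mp this with ⟨hp, -⟩ | hinf
              · exact absurd hp (by simp)
              · exact absurd ((PySem.Chars.isIn_iff_infix _ _).mpr hinf) hdd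
            · rfl
          by_cases hsp : PySem.Chars.isIn [' '] (c :: t) = true
          · have hmem : ' ' ∈ c :: t :=
              List.singleton_sublist.mp ((PySem.Chars.isIn_iff_infix _ _).mp hsp).sublist
            have hall := allow_space_mem hmem
            simp [hsp, hdd', hc', hl', hall]
          · have hsp' : PySem.Chars.isIn [' '] (c :: t) = false := by simpa using hsp
            rw [hc'] at hnd
            simp [hsp', hdd', hc', hl', hnd, noDub]
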